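-- pv_equiv track=rewrite | github.com/Ananta-dot/misr_new | pb+rl.py | motif_interleave
-- ===== SOURCE A (Python) =====
-- from typing import Dict, List, Tuple, Optional
--
-- Seq = List[int]; Instance = Tuple[Seq,Seq]
--
-- def motif_interleave(n:int)->Seq:
--     out=[];
--     for i in range(1,n+1,2):
--         j=i+1 if i+1<=n else i; out+=[i,j,i,j]
--     # fix counts
--     cnt={i:0 for i in range(1,n+1)}; fixed=[]
--     for x in out:
--         if cnt[x]<2: fixed.append(x); cnt[x]+=1
--     for i in range(1,n+1):
--         while cnt[i]<2: fixed.append(i); cnt[i]+=1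
--     return fixed[:2*n]
-- ===== SOURCE B (Python) =====
-- def motif_interleave(n: int) -> list:
--     # build the 2n-length interleaved motif sequence directly, one block per odd i
--     out = []
--     i = 1
--     while i <= n:
--         out += [i, i + 1, i, i + 1] if i + 1 <= n else [i, i]
--         i += 2
--     return out
-- ===== Notes on version B (the rewrite author's own statement) =====
-- stated objective: simpler
-- what changed: B builds the 2n-element sequence directly in one pass over the odd indices (four elements per pair, two for a lone final odd), dropping A's count dictionary, filtering pass, padding loop and truncation entirely.
import Mathlib
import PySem

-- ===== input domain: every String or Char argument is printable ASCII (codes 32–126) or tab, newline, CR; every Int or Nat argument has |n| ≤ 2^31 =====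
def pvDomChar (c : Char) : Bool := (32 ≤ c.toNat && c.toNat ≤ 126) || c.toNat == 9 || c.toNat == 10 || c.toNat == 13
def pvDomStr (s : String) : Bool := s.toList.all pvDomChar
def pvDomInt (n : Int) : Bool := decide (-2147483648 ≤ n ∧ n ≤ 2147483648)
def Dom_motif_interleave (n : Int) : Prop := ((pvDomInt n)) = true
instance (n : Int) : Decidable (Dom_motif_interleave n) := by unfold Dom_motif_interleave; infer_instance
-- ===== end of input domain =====

-- B builds the sequence directly block by block, without A's count dict / filter / pad / truncate passes (objective: simpler).

-- ===== PORT A =====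
-- 'while cnt[i] < 2: fixed.append(i); cnt[i] += 1' — the inner while loop of A's padding pass
def padA (cnt : PySem.Dict Int Int) (fixed : List Int) (i : Int) : PySem.Dict Int Int × List Int :=
  if cnt.getD i 0 < 2 then padA (cnt.insert i (cnt.getD i 0 + 1)) (fixed ++ [i]) i
  else (cnt, fixed)
termination_by (2 - cnt.getD i 0).toNat
decreasing_by simp [PySem.Dict.getD_insert_self]; omega

def motif_interleave (n : Int) : List Int :=
  let out := (PySem.List.pyRange 1 (n+1) 2).foldl
      (fun acc i => let j := if i+1 ≤ n then i+1 else i; acc ++ [i, j, i, j]) []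
  let cnt0 : PySem.Dict Int Int :=
      (PySem.List.pyRange 1 (n+1) 1).foldl (fun d i => d.insert i 0) PySem.Dict.empty
  -- cnt[x]: exact as getD here — every x of out lies in 1..n, so the key is always present
  let s := out.foldl
      (fun s x => if s.1.getD x 0 < 2 then (s.1.insert x (s.1.getD x 0 + 1), s.2 ++ [x]) else s)
      (cnt0, ([] : List Int))
  let t := (PySem.List.pyRange 1 (n+1) 1).foldl (fun s i => padA s.1 s.2 i) s
  PySem.List.slice t.2 none (some (2*n))

-- ===== PORT B =====
-- the 'while i <= n' loop of Source B
def buildB (i n : Int) : List Int :=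
  if _h : i ≤ n then
    (if i + 1 ≤ n then [i, i+1, i, i+1] else [i, i]) ++ buildB (i+2) n
  else []
termination_by (n + 1 - i).toNat
decreasing_by omega

def motif_interleave_alt (n : Int) : List Int := buildB 1 n

-- ===== PRECONDITION & SPEC =====
def Spec_motif_interleave (n : Int) (out : List Int) : Prop := out = motif_interleave_alt n
instance (n : Int) (out : List Int) : Decidable (Spec_motif_interleave n out) := by unfold Spec_motif_interleave; infer_instance

-- ===== CLAIM (what is proved, stated in full; the proofs are below) =====
def Claim_equal_motif_interleave : Prop := ∀ (n : Int), Dom_motif_interleave n → Spec_motif_interleave n (motif_interleave n)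

-- ===== LEMMAS AND PROOFS =====

-- the body of A's filtering loop, named for the proofs
def fstep (s : PySem.Dict Int Int × List Int) (x : Int) : PySem.Dict Int Int × List Int :=
  if s.1.getD x 0 < 2 then (s.1.insert x (s.1.getD x 0 + 1), s.2 ++ [x]) else s

lemma fstep_lt (c : PySem.Dict Int Int) (f : List Int) (x : Int) (h : c.getD x 0 < 2) :
    fstep (c, f) x = (c.insert x (c.getD x 0 + 1), f ++ [x]) := by
  unfold fstep; exact if_pos h

lemma fstep_ge (c : PySem.Dict Int Int) (f : List Int) (x : Int) (h : ¬ c.getD x 0 < 2) :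
    fstep (c, f) x = (c, f) := by
  unfold fstep; exact if_neg h

lemma pyRange_two_nil (a b : Int) (h : b ≤ a) : PySem.List.pyRange a b 2 = [] := by
  rw [PySem.List.pyRange_of_pos _ _ (show (0:Int) < 2 by norm_num)]
  rw [if_neg (show ¬ a < b by omega)]
  simp

lemma pyRange_two_cons (a b : Int) (h : a < b) :
    PySem.List.pyRange a b 2 = a :: PySem.List.pyRange (a+2) b 2 := by
  rw [PySem.List.pyRange_of_pos _ _ (show (0:Int) < 2 by norm_num),
      PySem.List.pyRange_of_pos _ _ (show (0:Int) < 2 by norm_num)]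
  rw [if_pos h]
  have hcount : ((b - a + 2 - 1) / 2).toNat
      = (if a + 2 < b then ((b - (a+2) + 2 - 1) / 2).toNat else 0) + 1 := by
    split_ifs with h2 <;> omega
  rw [hcount, List.range_succ_eq_map]
  simp only [List.map_cons, List.map_map, Nat.cast_zero, mul_zero, add_zero]
  congr 1
  apply List.map_congr_left
  intro k _
  simp only [Function.comp_apply]
  push_cast
  ring

lemma cnt0_getD (l : List Int) (d : PySem.Dict Int Int) (h : ∀ k, d.getD k 0 = 0) (k : Int) :
    (l.foldl (fun d i => d.insert i 0) d).getD k 0 = 0 := by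
  induction l generalizing d with
  | nil => exact h k
  | cons x xs ih =>
      simp only [List.foldl_cons]
      exact ih _ (fun k' => by rw [PySem.Dict.getD_insert]; split_ifs <;> simp [h])

lemma padA_done (cnt : PySem.Dict Int Int) (fixed : List Int) (i : Int)
    (h : ¬ cnt.getD i 0 < 2) : padA cnt fixed i = (cnt, fixed) := by
  rw [padA, if_neg h]

lemma pad_fold_id (l : List Int) (s : PySem.Dict Int Int × List Int)
    (h : ∀ i ∈ l, ¬ s.1.getD i 0 < 2) :
    l.foldl (fun s i => padA s.1 s.2 i) s = s := by
  induction l with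
  | nil => rfl
  | cons x xs ih =>
      simp only [List.foldl_cons]
      rw [padA_done _ _ _ (h x (by simp))]
      exact ih (fun i hi => h i (by simp [hi]))

lemma buildB_length (n : Int) : ∀ (m : Nat) (i : Int), (n + 1 - i).toNat ≤ m →
    (buildB i n).length = 2 * (n + 1 - i).toNat := by
  intro m
  induction m with
  | zero =>
      intro i hm
      rw [buildB, dif_neg (show ¬ i ≤ n by omega)]
      simp; omega
  | succ m ih =>
      intro i hm
      by_cases hi : i ≤ n
      · rw [buildB, dif_pos hi]
        by_cases hp : i + 1 ≤ n
        · rw [if_pos hp]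
          simp only [List.length_append, List.length_cons, List.length_nil]
          rw [ih (i+2) (by omega)]
          omega
        · rw [if_neg hp]
          simp only [List.length_append, List.length_cons, List.length_nil]
          rw [buildB, dif_neg (show ¬ i + 2 ≤ n by omega)]
          simp; omega
      · rw [buildB, dif_neg hi]; simp; omega

-- A's filtering pass over the blocks of 'out' produces exactly B's sequence, and count 2 on [i, n]
lemma filt_go (n : Int) : ∀ (m : Nat) (i : Int) (cnt : PySem.Dict Int Int) (fixed : List Int),
    (n + 1 - i).toNat ≤ m →
    (∀ k, i ≤ k → cnt.getD k 0 = 0) →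
    (((PySem.List.pyRange i (n+1) 2).flatMap
        (fun a => [a, if a+1 ≤ n then a+1 else a, a, if a+1 ≤ n then a+1 else a])).foldl
      fstep (cnt, fixed)).2 = fixed ++ buildB i n
    ∧ ∀ k, (((PySem.List.pyRange i (n+1) 2).flatMap
        (fun a => [a, if a+1 ≤ n then a+1 else a, a, if a+1 ≤ n then a+1 else a])).foldl
      fstep (cnt, fixed)).1.getD k 0 = if i ≤ k ∧ k ≤ n then 2 else cnt.getD k 0 := by
  intro m
  induction m with
  | zero =>
      intro i cnt fixed hm hc
      rw [pyRange_two_nil _ _ (show n + 1 ≤ i by omega)]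
      simp only [List.flatMap_nil, List.foldl_nil]
      refine ⟨by rw [buildB, dif_neg (show ¬ i ≤ n by omega)]; simp, ?_⟩
      intro k
      have hk : ¬ (i ≤ k ∧ k ≤ n) := by omega
      rw [if_neg hk]
  | succ m ih =>
      intro i cnt fixed hm hc
      by_cases hi : i ≤ n
      · rw [pyRange_two_cons _ _ (show i < n + 1 by omega)]
        simp only [List.flatMap_cons, List.foldl_append]
        by_cases hp : i + 1 ≤ n
        · simp only [if_pos hp, List.foldl_cons, List.foldl_nil]
          have hne : ((i:Int)+1) ≠ i := by omega
          have r1 : fstep (cnt, fixed) i = (cnt.insert i 1, fixed ++ [i]) := by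
            rw [fstep_lt _ _ _ (by rw [hc i le_rfl]; norm_num), hc i le_rfl]
            norm_num
          have g1 : (cnt.insert i 1).getD (i+1) 0 = 0 := by
            rw [PySem.Dict.getD_insert, if_neg hne, hc (i+1) (by omega)]
          have r2 : fstep (cnt.insert i 1, fixed ++ [i]) (i+1)
              = ((cnt.insert i 1).insert (i+1) 1, fixed ++ [i] ++ [i+1]) := by
            rw [fstep_lt _ _ _ (by rw [g1]; norm_num), g1]
            norm_num
          have g2 : ((cnt.insert i 1).insert (i+1) 1).getD i 0 = 1 := by
            rw [PySem.Dict.getD_insert, if_neg (show i ≠ i+1 by omega),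
                PySem.Dict.getD_insert, if_pos rfl]
          have r3 : fstep ((cnt.insert i 1).insert (i+1) 1, fixed ++ [i] ++ [i+1]) i
              = (((cnt.insert i 1).insert (i+1) 1).insert i 2, fixed ++ [i] ++ [i+1] ++ [i]) := by
            rw [fstep_lt _ _ _ (by rw [g2]; norm_num), g2]
            norm_num
          have g3 : (((cnt.insert i 1).insert (i+1) 1).insert i 2).getD (i+1) 0 = 1 := by
            rw [PySem.Dict.getD_insert, if_neg hne, PySem.Dict.getD_insert, if_pos rfl]
          have r4 : fstep (((cnt.insert i 1).insert (i+1) 1).insert i 2, fixed ++ [i] ++ [i+1] ++ [i]) (i+1)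
              = ((((cnt.insert i 1).insert (i+1) 1).insert i 2).insert (i+1) 2,
                 fixed ++ [i] ++ [i+1] ++ [i] ++ [i+1]) := by
            rw [fstep_lt _ _ _ (by rw [g3]; norm_num), g3]
            norm_num
          rw [r1, r2, r3, r4]
          have hc' : ∀ k, i + 2 ≤ k →
              ((((cnt.insert i 1).insert (i+1) 1).insert i 2).insert (i+1) 2).getD k 0 = 0 := by
            intro k hk
            rw [PySem.Dict.getD_insert, if_neg (show k ≠ i+1 by omega),
                PySem.Dict.getD_insert, if_neg (show k ≠ i by omega),
                PySem.Dict.getD_insert, if_neg (show k ≠ i+1 by omega),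
                PySem.Dict.getD_insert, if_neg (show k ≠ i by omega)]
            exact hc k (by omega)
          obtain ⟨h1, h2⟩ := ih (i+2) _ (fixed ++ [i] ++ [i+1] ++ [i] ++ [i+1]) (by omega) hc'
          constructor
          · rw [h1]
            have hb : buildB i n = [i, i+1, i, i+1] ++ buildB (i+2) n := by
              rw [buildB, dif_pos hi, if_pos hp]
            rw [hb]; simp
          · intro k
            rw [h2 k]
            by_cases hk2 : i + 2 ≤ k ∧ k ≤ n
            · rw [if_pos hk2, if_pos (show i ≤ k ∧ k ≤ n by omega)]
            · rw [if_neg hk2]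
              rw [PySem.Dict.getD_insert, PySem.Dict.getD_insert,
                  PySem.Dict.getD_insert, PySem.Dict.getD_insert]
              split_ifs with e1 e2 e3 e4 e5 <;> first
                | rfl
                | omega
        · -- lone final odd element: here i = n
          simp only [if_neg hp, List.foldl_cons, List.foldl_nil]
          have r1 : fstep (cnt, fixed) i = (cnt.insert i 1, fixed ++ [i]) := by
            rw [fstep_lt _ _ _ (by rw [hc i le_rfl]; norm_num), hc i le_rfl]
            norm_num
          have g1 : (cnt.insert i 1).getD i 0 = 1 := by
            rw [PySem.Dict.getD_insert, if_pos rfl]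
          have r2 : fstep (cnt.insert i 1, fixed ++ [i]) i
              = ((cnt.insert i 1).insert i 2, fixed ++ [i] ++ [i]) := by
            rw [fstep_lt _ _ _ (by rw [g1]; norm_num), g1]
            norm_num
          have g2 : ((cnt.insert i 1).insert i 2).getD i 0 = 2 := by
            rw [PySem.Dict.getD_insert, if_pos rfl]
          have r3 : fstep ((cnt.insert i 1).insert i 2, fixed ++ [i] ++ [i]) i
              = ((cnt.insert i 1).insert i 2, fixed ++ [i] ++ [i]) := by
            rw [fstep_ge _ _ _ (by rw [g2]; norm_num)]
          rw [r1, r2, r3, r3]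
          rw [pyRange_two_nil _ _ (show n + 1 ≤ i + 2 by omega)]
          simp only [List.flatMap_nil, List.foldl_nil]
          constructor
          · rw [buildB, dif_pos hi, if_neg hp, buildB, dif_neg (show ¬ i + 2 ≤ n by omega)]
            simp
          · intro k
            rw [PySem.Dict.getD_insert, PySem.Dict.getD_insert]
            split_ifs with e1 e2 e3 <;> first
              | rfl
              | omega
      · rw [pyRange_two_nil _ _ (show n + 1 ≤ i by omega)]
        simp only [List.flatMap_nil, List.foldl_nil]
        refine ⟨by rw [buildB, dif_neg hi]; simp, ?_⟩
        intro k
        have hk : ¬ (i ≤ k ∧ k ≤ n) := by omega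
        rw [if_neg hk]

-- ===== VERDICT (by name: the statement is the Claim_ definition above) =====
theorem motif_interleave_spec : Claim_equal_motif_interleave := by
  intro n _
  unfold Spec_motif_interleave motif_interleave motif_interleave_alt
  simp only []
  rw [show (fun (s : PySem.Dict Int Int × List Int) (x : Int) =>
        if s.1.getD x 0 < 2 then (s.1.insert x (s.1.getD x 0 + 1), s.2 ++ [x]) else s) = fstep
      from rfl]
  rw [PySem.List.foldl_append_eq_flatMap, List.nil_append]
  have hc0 : ∀ k, ((PySem.List.pyRange 1 (n+1) 1).foldl (fun d i => d.insert i 0)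
      (PySem.Dict.empty : PySem.Dict Int Int)).getD k 0 = 0 :=
    cnt0_getD _ _ (fun k => PySem.Dict.getD_empty ..)
  obtain ⟨h1, h2⟩ := filt_go n (n + 1 - 1).toNat 1 _ [] le_rfl (fun k _ => hc0 k)
  rw [pad_fold_id]
  · rw [h1, List.nil_append]
    by_cases hn : 0 ≤ n
    · rw [PySem.List.slice_to _ (show (0:Int) ≤ 2*n by omega)]
      apply List.take_of_length_le
      rw [buildB_length n (n + 1 - 1).toNat 1 le_rfl]
      omega
    · rw [buildB, dif_neg (show ¬ (1:Int) ≤ n by omega)]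
      simp [PySem.List.slice]
  · intro i hi
    rw [h2 i]
    rw [PySem.List.mem_pyRange_one] at hi
    rw [if_pos (show 1 ≤ i ∧ i ≤ n by omega)]
    norm_num
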